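-- pv_equiv track=rewrite | github.com/jvsn19/ri | wrapper/wrappers.py | get_list_info_up
-- ===== SOURCE A (Python) =====
-- labels_general = ['Game','Price','OS','Processor','Memory','Graphics','DirectX','Storage', 'Description']
--
-- def get_list_info_up(name, listReq, l, price):
--     info = []
--     offset = 0
--     if(name == None): info.append(None)
--     else: info.append(name[0])
--
--     if(price == None): info.append(None)
--     else: info.append(price[0])
--     if('Requires a 64-bit processor and operating system' in l): offset = 1
--     for j in range(2, len(labels_general)):
--         printou = False
--         search = labels_general[j]
--         if(search == "Storage"): search = "disk space"
--         for i in range(0,len(listReq)):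
--             if (listReq[i].lower() == (labels_general[j] + ":").lower()):
--                 if(i + offset >= len(l)): info.append("--")
--                 else: info.append(l[i + offset].lower())
--                 printou = True
--         if(printou == False): info.append("--")
--     return info
-- ===== SOURCE B (Python) =====
-- labels_general = ['Game','Price','OS','Processor','Memory','Graphics','DirectX','Storage', 'Description']
--
-- def get_list_info_up(name, listReq, l, price):
--     # Single pass over listReq: each entry is dispatched into the bucket of the label
--     # it names (via a slot map), then the buckets are assembled in label order with
--     # '--' for an empty bucket.  A instead rescans listReq once per label.
--     slot_of = {(lab + ':').lower(): j for j, lab in enumerate(labels_general[2:])}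
--     buckets = [[] for _ in labels_general[2:]]
--     offset = 1 if 'Requires a 64-bit processor and operating system' in l else 0
--     for i, req in enumerate(listReq):
--         slot = slot_of.get(req.lower())
--         if slot is not None:
--             buckets[slot].append('--' if i + offset >= len(l) else l[i + offset].lower())
--     info = [None if name is None else name[0], None if price is None else price[0]]
--     for b in buckets:
--         info.extend(b if b else ['--'])
--     return info
-- ===== Notes on version B (the rewrite author's own statement) =====
-- stated objective: faster
-- what changed: B inverts the loop nesting: one single pass over listReq dispatches each entry into a per-label bucket via a precomputed slot map, and a final assembly pass emits the buckets in label order with '--' for empty ones, instead of A's full rescan of listReq for each of the 7 labels; the dead 'disk space' substitution is dropped.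
import Mathlib
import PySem

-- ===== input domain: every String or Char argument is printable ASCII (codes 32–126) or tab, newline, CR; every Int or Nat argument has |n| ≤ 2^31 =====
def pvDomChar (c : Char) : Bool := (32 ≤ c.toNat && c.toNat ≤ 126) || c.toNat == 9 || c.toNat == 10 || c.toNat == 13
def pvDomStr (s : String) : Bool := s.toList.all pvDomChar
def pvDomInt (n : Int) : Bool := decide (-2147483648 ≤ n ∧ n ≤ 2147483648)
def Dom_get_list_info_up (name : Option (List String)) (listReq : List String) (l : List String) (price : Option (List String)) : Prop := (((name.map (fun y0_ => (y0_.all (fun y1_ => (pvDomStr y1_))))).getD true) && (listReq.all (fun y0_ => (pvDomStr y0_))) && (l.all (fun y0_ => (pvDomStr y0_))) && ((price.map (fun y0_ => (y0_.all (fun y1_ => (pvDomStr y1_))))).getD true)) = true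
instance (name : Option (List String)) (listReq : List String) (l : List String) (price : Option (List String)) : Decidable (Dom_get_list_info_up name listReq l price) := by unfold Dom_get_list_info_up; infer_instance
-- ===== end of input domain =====

-- B inverts A's loop nesting: one pass over listReq dispatches each entry into a
-- per-label bucket via a slot map, then one assembly pass (objective: faster, constant-factor).

def labelsGeneral : List String :=
  ["Game", "Price", "OS", "Processor", "Memory", "Graphics", "DirectX", "Storage", "Description"]

def reqBig : String := "Requires a 64-bit processor and operating system"

-- '"--" if i+offset >= len(l) else l[i+offset].lower()': for the nonnegative index
-- i+offset reached here, pyGet? is none exactly when i+offset >= len l.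
def entryAt (l : List String) (offset i : Int) : String :=
  match PySem.List.pyGet? l (i + offset) with
  | none => "--"
  | some s => PySem.Str.lower s

-- ===== PORT A =====
-- body of A's loop over j: scan all of listReq, appending per match, with the 'printou' flag
def stepA (listReq l : List String) (offset : Int) (info : List (Option String)) (label : String) :
    List (Option String) :=
  let r := (PySem.List.enumerate listReq).foldl
    (fun (st : List (Option String) × Bool) p =>
      if PySem.Str.lower p.2 == PySem.Str.lower (label ++ ":") then
        (st.1 ++ [some (entryAt l offset p.1)], true)
      else st) (info, false)
  if r.2 then r.1 else r.1 ++ [some "--"]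

def get_list_info_up (name : Option (List String)) (listReq : List String) (l : List String) (price : Option (List String)) : List (Option String) :=
  let info : List (Option String) := []
  let info := info ++ [match name with | none => none | some ns => PySem.List.pyGet? ns 0]
  let info := info ++ [match price with | none => none | some ps => PySem.List.pyGet? ps 0]
  let offset : Int := if l.contains reqBig then 1 else 0
  -- A's 'search = "disk space"' branch is dead code ('search' is never read) and is not ported
  (PySem.List.pyRange 2 9 1).foldl
    (fun info j => stepA listReq l offset info ((PySem.List.pyGet? labelsGeneral j).getD "")) info

-- ===== PORT B =====
-- slot_of = {(lab + ':').lower(): j for j, lab in enumerate(labels_general[2:])}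
def slotOf : PySem.Dict String Int :=
  (PySem.List.enumerate (labelsGeneral.drop 2)).foldl
    (fun d p => d.insert (PySem.Str.lower (p.2 ++ ":")) p.1) PySem.Dict.empty

-- loop body: 'slot = slot_of.get(req.lower()); if slot is not None: buckets[slot].append(…)'
def stepB (l : List String) (offset : Int) (buckets : List (List (Option String)))
    (p : Int × String) : List (List (Option String)) :=
  match slotOf.get? (PySem.Str.lower p.2) with
  | none => buckets
  | some t =>
      PySem.List.pySetD buckets t
        (PySem.List.pyGetD buckets t [] ++ [some (entryAt l offset p.1)])

def get_list_info_up_alt (name : Option (List String)) (listReq : List String) (l : List String) (price : Option (List String)) : List (Option String) :=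
  let buckets : List (List (Option String)) := (labelsGeneral.drop 2).map (fun _ => [])
  let offset : Int := if l.contains reqBig then 1 else 0
  let buckets := (PySem.List.enumerate listReq).foldl (stepB l offset) buckets
  let info : List (Option String) :=
    [match name with | none => none | some ns => PySem.List.pyGet? ns 0,
     match price with | none => none | some ps => PySem.List.pyGet? ps 0]
  buckets.foldl (fun info b => info ++ (if b.isEmpty then [some "--"] else b)) info

-- ===== PRECONDITION & SPEC =====
-- name[0] / price[0] raise IndexError in both Pythons when the list is present but empty;
-- exactly those inputs are excluded.
def Pre_get_list_info_up (name : Option (List String)) (listReq : List String) (l : List String) (price : Option (List String)) : Prop :=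
  name ≠ some [] ∧ price ≠ some []
instance (name : Option (List String)) (listReq : List String) (l : List String) (price : Option (List String)) : Decidable (Pre_get_list_info_up name listReq l price) := by unfold Pre_get_list_info_up; infer_instance

def pvWitness_get_list_info_up : Option (List String) × List String × List String × Option (List String) :=
  (some ["Doom"], ["os:", "linux"], ["Requires a 64-bit processor and operating system", "windows"], some ["$5"])

def Spec_get_list_info_up (name : Option (List String)) (listReq : List String) (l : List String) (price : Option (List String)) (out : List (Option String)) : Prop := out = get_list_info_up_alt name listReq l price
instance (name : Option (List String)) (listReq : List String) (l : List String) (price : Option (List String)) (out : List (Option String)) : Decidable (Spec_get_list_info_up name listReq l price out) := by unfold Spec_get_list_info_up; infer_instance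

-- ===== CLAIM (what is proved, stated in full; the proofs are below) =====
def Claim_equal_get_list_info_up : Prop := ∀ (name : Option (List String)) (listReq : List String) (l : List String) (price : Option (List String)), Dom_get_list_info_up name listReq l price → Pre_get_list_info_up name listReq l price → Spec_get_list_info_up name listReq l price (get_list_info_up name listReq l price)

-- ===== LEMMAS AND PROOFS =====

-- the ordered matches of one label key, as both programs produce them
def seg (l : List String) (off : Int) (ps : List (Int × String)) (k : String) : List (Option String) :=
  (ps.filter (fun p => PySem.Str.lower p.2 == k)).map (fun p => some (entryAt l off p.1))

def segOut (l : List String) (off : Int) (ps : List (Int × String)) (k : String) : List (Option String) :=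
  if (seg l off ps k).isEmpty then [some "--"] else seg l off ps k

-- A's inner scan with flag = append the mapped matches, flag = "some match found"
theorem innerA_eq (l : List String) (offset : Int) (k : String) :
    ∀ (ps : List (Int × String)) (acc : List (Option String)) (b : Bool),
      ps.foldl
        (fun (st : List (Option String) × Bool) p =>
          if PySem.Str.lower p.2 == k then (st.1 ++ [some (entryAt l offset p.1)], true) else st)
        (acc, b)
      = (acc ++ seg l offset ps k, b || !(seg l offset ps k).isEmpty) := by
  intro ps
  induction ps with
  | nil => intro acc b; simp [seg]
  | cons p ps ih =>
    intro acc b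
    rw [List.foldl_cons]
    by_cases h : PySem.Str.lower p.2 == k
    · rw [if_pos h, ih]
      simp [seg, h]
    · rw [if_neg h, ih]
      simp [seg, h]

-- A's per-label step appends the segment, or '--' when it is empty
theorem stepA_eq (listReq l : List String) (offset : Int) (info : List (Option String)) (label : String) :
    stepA listReq l offset info label
      = info ++ segOut l offset (PySem.List.enumerate listReq) (PySem.Str.lower (label ++ ":")) := by
  unfold stepA segOut
  rw [innerA_eq]
  by_cases h : (seg l offset (PySem.List.enumerate listReq) (PySem.Str.lower (label ++ ":"))).isEmpty
  · simp [List.isEmpty_iff.mp h]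
  · simp [h]

-- a string equal to none of the seven keys misses the slot map
theorem slot_none (s : String)
    (h0 : s ≠ "os:") (h1 : s ≠ "processor:") (h2 : s ≠ "memory:") (h3 : s ≠ "graphics:")
    (h4 : s ≠ "directx:") (h5 : s ≠ "storage:") (h6 : s ≠ "description:") :
    slotOf.get? s = none := by
  have he : slotOf = PySem.Dict.mk [("os:", (0 : Int)), ("processor:", 1), ("memory:", 2),
      ("graphics:", 3), ("directx:", 4), ("storage:", 5), ("description:", 6)] := by decide
  rw [he]
  simp [h0.symm, h1.symm, h2.symm, h3.symm, h4.symm, h5.symm, h6.symm,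
    PySem.Dict.get?]

-- the single pass over listReq fills each bucket with exactly its label's segment, in order
theorem invB (l : List String) (off : Int) :
    ∀ (ps : List (Int × String)) (b0 b1 b2 b3 b4 b5 b6 : List (Option String)),
      ps.foldl (stepB l off) [b0, b1, b2, b3, b4, b5, b6]
        = [b0 ++ seg l off ps "os:", b1 ++ seg l off ps "processor:",
           b2 ++ seg l off ps "memory:", b3 ++ seg l off ps "graphics:",
           b4 ++ seg l off ps "directx:", b5 ++ seg l off ps "storage:",
           b6 ++ seg l off ps "description:"] := by
  intro ps
  induction ps with
  | nil => intro b0 b1 b2 b3 b4 b5 b6; simp [seg]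
  | cons p ps ih =>
    intro b0 b1 b2 b3 b4 b5 b6
    rw [List.foldl_cons]
    by_cases h0 : PySem.Str.lower p.2 = "os:"
    · have : stepB l off [b0, b1, b2, b3, b4, b5, b6] p
          = [b0 ++ [some (entryAt l off p.1)], b1, b2, b3, b4, b5, b6] := by
        unfold stepB; rw [h0]; rfl
      rw [this, ih]; simp [seg, h0]
    · by_cases h1 : PySem.Str.lower p.2 = "processor:"
      · have : stepB l off [b0, b1, b2, b3, b4, b5, b6] p
            = [b0, b1 ++ [some (entryAt l off p.1)], b2, b3, b4, b5, b6] := by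
          unfold stepB; rw [h1]; rfl
        rw [this, ih]; simp [seg, h1]
      · by_cases h2 : PySem.Str.lower p.2 = "memory:"
        · have : stepB l off [b0, b1, b2, b3, b4, b5, b6] p
              = [b0, b1, b2 ++ [some (entryAt l off p.1)], b3, b4, b5, b6] := by
            unfold stepB; rw [h2]; rfl
          rw [this, ih]; simp [seg, h2]
        · by_cases h3 : PySem.Str.lower p.2 = "graphics:"
          · have : stepB l off [b0, b1, b2, b3, b4, b5, b6] p
                = [b0, b1, b2, b3 ++ [some (entryAt l off p.1)], b4, b5, b6] := by
              unfold stepB; rw [h3]; rfl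
            rw [this, ih]; simp [seg, h3]
          · by_cases h4 : PySem.Str.lower p.2 = "directx:"
            · have : stepB l off [b0, b1, b2, b3, b4, b5, b6] p
                  = [b0, b1, b2, b3, b4 ++ [some (entryAt l off p.1)], b5, b6] := by
                unfold stepB; rw [h4]; rfl
              rw [this, ih]; simp [seg, h4]
            · by_cases h5 : PySem.Str.lower p.2 = "storage:"
              · have : stepB l off [b0, b1, b2, b3, b4, b5, b6] p
                    = [b0, b1, b2, b3, b4, b5 ++ [some (entryAt l off p.1)], b6] := by
                  unfold stepB; rw [h5]; rfl
                rw [this, ih]; simp [seg, h5]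
              · by_cases h6 : PySem.Str.lower p.2 = "description:"
                · have : stepB l off [b0, b1, b2, b3, b4, b5, b6] p
                      = [b0, b1, b2, b3, b4, b5, b6 ++ [some (entryAt l off p.1)]] := by
                    unfold stepB; rw [h6]; rfl
                  rw [this, ih]; simp [seg, h6]
                · have : stepB l off [b0, b1, b2, b3, b4, b5, b6] p
                      = [b0, b1, b2, b3, b4, b5, b6] := by
                    unfold stepB
                    rw [slot_none _ h0 h1 h2 h3 h4 h5 h6]
                  rw [this, ih]; simp [seg, h0, h1, h2, h3, h4, h5, h6]

-- the outer loop over range(2, 9) with labels_general[j] = the fold over labelsGeneral.drop 2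
theorem outer_eq (F : List (Option String) → String → List (Option String)) (info : List (Option String)) :
    (PySem.List.pyRange 2 9 1).foldl
      (fun info j => F info ((PySem.List.pyGet? labelsGeneral j).getD "")) info
    = (labelsGeneral.drop 2).foldl F info := by
  have h : (PySem.List.pyRange 2 9 1).map
      (fun j => (PySem.List.pyGet? labelsGeneral j).getD "") = labelsGeneral.drop 2 := by decide
  rw [← h, List.foldl_map]

-- ===== VERDICT (by name: the statement is the Claim_ definition above) =====
theorem get_list_info_up_spec : Claim_equal_get_list_info_up := by
  intro name listReq l price _ _
  unfold Spec_get_list_info_up get_list_info_up get_list_info_up_alt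
  dsimp only
  rw [outer_eq]
  rw [show (labelsGeneral.drop 2).map (fun _ => ([] : List (Option String)))
        = [[], [], [], [], [], [], []] from rfl]
  rw [invB]
  simp only [labelsGeneral, List.drop, List.foldl_cons, List.foldl_nil, stepA_eq]
  have e0 : PySem.Str.lower ("OS" ++ ":") = "os:" := by decide
  have e1 : PySem.Str.lower ("Processor" ++ ":") = "processor:" := by decide
  have e2 : PySem.Str.lower ("Memory" ++ ":") = "memory:" := by decide
  have e3 : PySem.Str.lower ("Graphics" ++ ":") = "graphics:" := by decide
  have e4 : PySem.Str.lower ("DirectX" ++ ":") = "directx:" := by decide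
  have e5 : PySem.Str.lower ("Storage" ++ ":") = "storage:" := by decide
  have e6 : PySem.Str.lower ("Description" ++ ":") = "description:" := by decide
  simp only [e0, e1, e2, e3, e4, e5, e6, segOut, List.nil_append, List.cons_append,
    List.append_assoc]
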